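-- pv_equiv track=rewrite | github.com/Mi7ai/Algoritmia | Repaso Examenes/enero2020/enero2020pd4.py | partido_rec_mem_camino
-- ===== SOURCE A (Python) =====
-- def partido_rec_mem_camino(C, S, N, M):
-- 	def L(n, m):
--
-- 		if n == 0:
-- 			return 0
-- 		if (n, m) not in mem:
-- 			if m >= C[n - 1]:
-- 				mem[n, m] = max((L(n - 1, m - d * C[n - 1]) + d * S[n - 1] + (1 - d) * N[n - 1], d) for d in range(2))
-- 			else:
-- 				mem[n, m] = (L(n - 1, m) + N[n - 1], 0)
-- 		return mem[n, m][0]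
--
-- 	# nr ciudades
-- 	nr = len(S)
-- 	mem = {}
-- 	sol = []
-- 	score = L(nr, M)
-- 	n, m = len(S), M
-- 	# n = len(S)
-- 	while n > 0:
-- 		d = mem[n, m][1]
-- 		sol.append(d)
-- 		m -= d * C[n - 1]
-- 		n -= 1
--
-- 	sol.reverse()
-- 	return score, sol
-- ===== SOURCE B (Python) =====
-- def partido_rec_mem_camino(C, S, N, M):
--     # Plain recursion that returns (best score, decision path) directly,
--     # instead of a memo table plus a separate reconstruction walk.
--     def go(n, m):
--         if n == 0:
--             return 0, []
--         if m >= C[n - 1]: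
--             s0, p0 = go(n - 1, m)
--             v0 = s0 + N[n - 1]
--             s1, p1 = go(n - 1, m - C[n - 1])
--             v1 = s1 + S[n - 1]
--             if v1 >= v0:
--                 return v1, p1 + [1]
--             return v0, p0 + [0]
--         s0, p0 = go(n - 1, m)
--         return s0 + N[n - 1], p0 + [0]
--
--     score, sol = go(len(S), M)
--     return score, sol
-- ===== Notes on version B (the rewrite author's own statement) =====
-- stated objective: simpler
-- what changed: A's memoized top-down recursion with a shared dict plus a separate backward reconstruction loop over the memo is replaced by one plain recursion that returns the (score, decision path) pair directly, with the d=1-on-ties rule made explicit (v1 >= v0).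
import Mathlib
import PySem

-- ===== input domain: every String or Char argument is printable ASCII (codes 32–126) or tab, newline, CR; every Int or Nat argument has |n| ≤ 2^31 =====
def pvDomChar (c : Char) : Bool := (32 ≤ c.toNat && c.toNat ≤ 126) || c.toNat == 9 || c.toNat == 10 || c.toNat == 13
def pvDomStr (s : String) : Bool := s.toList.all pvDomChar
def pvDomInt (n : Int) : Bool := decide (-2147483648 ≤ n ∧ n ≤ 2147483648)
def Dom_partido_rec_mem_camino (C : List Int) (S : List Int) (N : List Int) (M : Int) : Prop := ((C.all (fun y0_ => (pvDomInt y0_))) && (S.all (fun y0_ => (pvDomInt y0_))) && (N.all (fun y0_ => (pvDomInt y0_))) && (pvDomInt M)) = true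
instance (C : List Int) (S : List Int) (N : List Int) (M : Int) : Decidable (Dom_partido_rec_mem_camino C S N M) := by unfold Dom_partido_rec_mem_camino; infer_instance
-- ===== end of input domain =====

-- B replaces A's memoized recursion + backward path reconstruction by one plain recursion
-- returning (score, path) directly (objective: simpler; it trades away A's memoization).

-- ===== PORT A =====
-- memoized recursive helper L; the dict of tuples (value, choice) is threaded as state.
-- indices C[n-1]/S[n-1]/N[n-1]: in range under Pre_, so `.getD 0` is never taken there.
def pvLA (C : List Int) (S : List Int) (N : List Int) :
    Nat → Int → PySem.Dict (Int × Int) (Int × Int) →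
    Int × PySem.Dict (Int × Int) (Int × Int)
  | 0, _, mem => (0, mem)
  | n+1, m, mem =>
    match mem.get? ((n : Int) + 1, m) with
    | some t => (t.1, mem)                                   -- (n, m) already in mem
    | none =>
      let c := (PySem.List.pyGet? C (n : Int)).getD 0
      let s := (PySem.List.pyGet? S (n : Int)).getD 0
      let nn := (PySem.List.pyGet? N (n : Int)).getD 0
      if m ≥ c then
        -- max over d in range(2) of the tuples (L(n-1, m - d*C[n-1]) + d*S[n-1] + (1-d)*N[n-1], d):
        -- d = 0 gives (L(n-1, m) + N[n-1], 0), d = 1 gives (L(n-1, m - c) + S[n-1], 1)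
        let r0 := pvLA C S N n m mem
        let t0 : Int × Int := (r0.1 + nn, 0)
        let r1 := pvLA C S N n (m - c) r0.2
        let t1 : Int × Int := (r1.1 + s, 1)
        -- Python's max of the two tuples (lexicographic)
        let best := if t1.1 > t0.1 ∨ (t1.1 = t0.1 ∧ t1.2 > t0.2) then t1 else t0
        (best.1, r1.2.insert ((n : Int) + 1, m) best)
      else
        let r0 := pvLA C S N n m mem
        (r0.1 + nn, r0.2.insert ((n : Int) + 1, m) (r0.1 + nn, 0))

-- the `while n > 0` reconstruction loop: appends choices, caller reverses
def pvReconA (C : List Int) (mem : PySem.Dict (Int × Int) (Int × Int)) :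
    Nat → Int → List Int → List Int
  | 0, _, sol => sol
  | n+1, m, sol =>
    let d := ((mem.get? ((n : Int) + 1, m)).getD (0, 0)).2
    pvReconA C mem n (m - d * ((PySem.List.pyGet? C (n : Int)).getD 0)) (sol ++ [d])

def partido_rec_mem_camino (C : List Int) (S : List Int) (N : List Int) (M : Int) : Int × List Int :=
  let nr := S.length
  let r := pvLA C S N nr M (PySem.Dict.mk [])
  let sol := pvReconA C r.2 nr M []
  (r.1, sol.reverse)

-- ===== PORT B =====
-- B's go: plain recursion returning (score, path) directly
def pvGoB (C : List Int) (S : List Int) (N : List Int) : Nat → Int → Int × List Int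
  | 0, _ => (0, [])
  | n+1, m =>
    let c := (PySem.List.pyGet? C (n : Int)).getD 0
    if m ≥ c then
      let r0 := pvGoB C S N n m
      let v0 := r0.1 + (PySem.List.pyGet? N (n : Int)).getD 0
      let r1 := pvGoB C S N n (m - c)
      let v1 := r1.1 + (PySem.List.pyGet? S (n : Int)).getD 0
      if v1 ≥ v0 then (v1, r1.2 ++ [1]) else (v0, r0.2 ++ [0])
    else
      let r0 := pvGoB C S N n m
      (r0.1 + (PySem.List.pyGet? N (n : Int)).getD 0, r0.2 ++ [0])

def partido_rec_mem_camino_alt (C : List Int) (S : List Int) (N : List Int) (M : Int) : Int × List Int :=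
  pvGoB C S N S.length M

-- ===== PRECONDITION & SPEC =====
-- Pre_ excludes exactly the inputs where A raises IndexError: a nonempty S with C or N
-- shorter than S (the recursion indexes C[n-1] and N[n-1] for every n up to len(S)).
def Pre_partido_rec_mem_camino (C : List Int) (S : List Int) (N : List Int) (M : Int) : Prop :=
  S = [] ∨ (S.length ≤ C.length ∧ S.length ≤ N.length)
instance (C : List Int) (S : List Int) (N : List Int) (M : Int) : Decidable (Pre_partido_rec_mem_camino C S N M) := by unfold Pre_partido_rec_mem_camino; infer_instance

def pvWitness_partido_rec_mem_camino : List Int × List Int × List Int × Int := ([3, 2], [5, 4], [1, 1], 4)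

def Spec_partido_rec_mem_camino (C : List Int) (S : List Int) (N : List Int) (M : Int) (out : Int × List Int) : Prop := out = partido_rec_mem_camino_alt C S N M
instance (C : List Int) (S : List Int) (N : List Int) (M : Int) (out : Int × List Int) : Decidable (Spec_partido_rec_mem_camino C S N M out) := by unfold Spec_partido_rec_mem_camino; infer_instance

-- ===== CLAIM (what is proved, stated in full; the proofs are below) =====
def Claim_equal_partido_rec_mem_camino : Prop := ∀ (C : List Int) (S : List Int) (N : List Int) (M : Int), Dom_partido_rec_mem_camino C S N M → Pre_partido_rec_mem_camino C S N M → Spec_partido_rec_mem_camino C S N M (partido_rec_mem_camino C S N M)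

-- ===== LEMMAS AND PROOFS =====

-- value and path computed by B
def bV (C S N : List Int) (n : Nat) (m : Int) : Int := (pvGoB C S N n m).1
def bP (C S N : List Int) (n : Nat) (m : Int) : List Int := (pvGoB C S N n m).2

def cAt (L : List Int) (n : Nat) : Int := (PySem.List.pyGet? L (n : Int)).getD 0

-- the tuple A stores in mem under key (n+1, m)
def entryE (C S N : List Int) (n : Nat) (m : Int) : Int × Int :=
  if m ≥ cAt C n then
    if (pvGoB C S N n (m - cAt C n)).1 + cAt S n ≥ (pvGoB C S N n m).1 + cAt N n
    then ((pvGoB C S N n (m - cAt C n)).1 + cAt S n, 1)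
    else ((pvGoB C S N n m).1 + cAt N n, 0)
  else ((pvGoB C S N n m).1 + cAt N n, 0)

-- the budget left after taking the choice stored for (n+1, m)
def nextM (C S N : List Int) (n : Nat) (m : Int) : Int :=
  m - (entryE C S N n m).2 * cAt C n

lemma goB_succ (C S N : List Int) (n : Nat) (m : Int) :
    pvGoB C S N (n+1) m =
      (if m ≥ cAt C n then
        if (pvGoB C S N n (m - cAt C n)).1 + cAt S n ≥ (pvGoB C S N n m).1 + cAt N n
        then ((pvGoB C S N n (m - cAt C n)).1 + cAt S n, (pvGoB C S N n (m - cAt C n)).2 ++ [1])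
        else ((pvGoB C S N n m).1 + cAt N n, (pvGoB C S N n m).2 ++ [0])
      else ((pvGoB C S N n m).1 + cAt N n, (pvGoB C S N n m).2 ++ [0])) := rfl

lemma entry_fst (C S N : List Int) (n : Nat) (m : Int) :
    (entryE C S N n m).1 = bV C S N (n+1) m := by
  unfold bV
  rw [goB_succ, entryE]
  split_ifs <;> rfl

lemma path_succ (C S N : List Int) (n : Nat) (m : Int) :
    bP C S N (n+1) m = bP C S N n (nextM C S N n m) ++ [(entryE C S N n m).2] := by
  unfold bP nextM
  rw [goB_succ, entryE]
  split_ifs <;> simp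

-- every state on the descent path from (n, m) is stored in d with A's entry
def HasPath (C S N : List Int) (d : PySem.Dict (Int × Int) (Int × Int)) :
    Nat → Int → Prop
  | 0, _ => True
  | n+1, m => d.get? ((n : Int) + 1, m) = some (entryE C S N n m) ∧
      HasPath C S N d n (nextM C S N n m)

-- the memo invariant: every stored entry is A's entry for its key, with its descent path stored
def MemInv (C S N : List Int) (d : PySem.Dict (Int × Int) (Int × Int)) : Prop :=
  ∀ (n : Nat) (m : Int) (t : Int × Int), d.get? ((n : Int) + 1, m) = some t →
    t = entryE C S N n m ∧ HasPath C S N d n (nextM C S N n m)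

def Grows (d d' : PySem.Dict (Int × Int) (Int × Int)) : Prop :=
  ∀ k t, d.get? k = some t → d'.get? k = some t

lemma grows_refl (d : PySem.Dict (Int × Int) (Int × Int)) : Grows d d := fun _ _ h => h

lemma grows_trans {d1 d2 d3 : PySem.Dict (Int × Int) (Int × Int)}
    (h1 : Grows d1 d2) (h2 : Grows d2 d3) : Grows d1 d3 :=
  fun k t h => h2 k t (h1 k t h)

lemma hasPath_mono (C S N : List Int) {d d' : PySem.Dict (Int × Int) (Int × Int)}
    (hg : Grows d d') : ∀ (n : Nat) (m : Int), HasPath C S N d n m → HasPath C S N d' n m := by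
  intro n
  induction n with
  | zero => intro m _; trivial
  | succ n ih => intro m h; exact ⟨hg _ _ h.1, ih _ h.2⟩

lemma grows_insert_entry (C S N : List Int) {d : PySem.Dict (Int × Int) (Int × Int)}
    (hinv : MemInv C S N d) (n : Nat) (m : Int) :
    Grows d (d.insert ((n : Int) + 1, m) (entryE C S N n m)) := by
  intro k t h
  rw [PySem.Dict.get?_insert]
  split_ifs with hk
  · subst hk
    rw [(hinv n m t h).1]
  · exact h

lemma meminv_insert (C S N : List Int) {d : PySem.Dict (Int × Int) (Int × Int)}
    (hinv : MemInv C S N d) (n : Nat) (m : Int)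
    (hp : HasPath C S N d n (nextM C S N n m)) :
    MemInv C S N (d.insert ((n : Int) + 1, m) (entryE C S N n m)) := by
  have hg := grows_insert_entry C S N hinv n m
  intro n' m' t ht
  rw [PySem.Dict.get?_insert] at ht
  split_ifs at ht with hk
  · have hn : n' = n := by
      have h1 : ((n' : Int) + 1) = (n : Int) + 1 := congrArg Prod.fst hk
      omega
    have hm : m' = m := congrArg Prod.snd hk
    subst hn; subst hm
    exact ⟨by injection ht with h2; exact h2.symm,
      hasPath_mono C S N hg _ _ hp⟩
  · obtain ⟨h1, h2⟩ := hinv n' m' t ht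
    exact ⟨h1, hasPath_mono C S N hg _ _ h2⟩

-- the candidate A's tuple-max keeps when m >= C[n]
def bestT (C S N : List Int) (n : Nat) (m : Int)
    (d : PySem.Dict (Int × Int) (Int × Int)) : Int × Int :=
  if (pvLA C S N n (m - (PySem.List.pyGet? C (n : Int)).getD 0) (pvLA C S N n m d).2).1 + (PySem.List.pyGet? S (n : Int)).getD 0 > (pvLA C S N n m d).1 + (PySem.List.pyGet? N (n : Int)).getD 0 ∨
     ((pvLA C S N n (m - (PySem.List.pyGet? C (n : Int)).getD 0) (pvLA C S N n m d).2).1 + (PySem.List.pyGet? S (n : Int)).getD 0 = (pvLA C S N n m d).1 + (PySem.List.pyGet? N (n : Int)).getD 0 ∧ (1 : Int) > 0)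
  then ((pvLA C S N n (m - (PySem.List.pyGet? C (n : Int)).getD 0) (pvLA C S N n m d).2).1 + (PySem.List.pyGet? S (n : Int)).getD 0, 1)
  else ((pvLA C S N n m d).1 + (PySem.List.pyGet? N (n : Int)).getD 0, 0)

lemma pvLA_hit (C S N : List Int) (n : Nat) (m : Int)
    (d : PySem.Dict (Int × Int) (Int × Int)) (t : Int × Int)
    (h : d.get? ((n : Int) + 1, m) = some t) :
    pvLA C S N (n+1) m d = (t.1, d) := by
  conv_lhs => unfold pvLA
  rw [h]

lemma pvLA_miss_ge (C S N : List Int) (n : Nat) (m : Int)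
    (d : PySem.Dict (Int × Int) (Int × Int))
    (h : d.get? ((n : Int) + 1, m) = none)
    (hc : m ≥ (PySem.List.pyGet? C (n : Int)).getD 0) :
    pvLA C S N (n+1) m d =
      ((bestT C S N n m d).1,
        (pvLA C S N n (m - (PySem.List.pyGet? C (n : Int)).getD 0) (pvLA C S N n m d).2).2.insert ((n : Int) + 1, m) (bestT C S N n m d)) := by
  conv_lhs => unfold pvLA
  rw [h, if_pos hc]
  try rfl

lemma pvLA_miss_lt (C S N : List Int) (n : Nat) (m : Int)
    (d : PySem.Dict (Int × Int) (Int × Int))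
    (h : d.get? ((n : Int) + 1, m) = none)
    (hc : ¬ m ≥ (PySem.List.pyGet? C (n : Int)).getD 0) :
    pvLA C S N (n+1) m d =
      ((pvLA C S N n m d).1 + (PySem.List.pyGet? N (n : Int)).getD 0,
        (pvLA C S N n m d).2.insert ((n : Int) + 1, m) ((pvLA C S N n m d).1 + (PySem.List.pyGet? N (n : Int)).getD 0, 0)) := by
  conv_lhs => unfold pvLA
  rw [h, if_neg hc]
  try rfl

lemma LA_ok (C S N : List Int) :
    ∀ (n : Nat) (m : Int) (d : PySem.Dict (Int × Int) (Int × Int)), MemInv C S N d →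
      (pvLA C S N n m d).1 = bV C S N n m ∧
      MemInv C S N (pvLA C S N n m d).2 ∧
      Grows d (pvLA C S N n m d).2 ∧
      HasPath C S N (pvLA C S N n m d).2 n m := by
  intro n
  induction n with
  | zero =>
    intro m d hinv
    exact ⟨rfl, hinv, grows_refl d, trivial⟩
  | succ n ih =>
    intro m d hinv
    cases hmem : d.get? ((n : Int) + 1, m) with
    | some t =>
      obtain ⟨ht, hp⟩ := hinv n m t hmem
      subst ht
      rw [pvLA_hit C S N n m d _ hmem]
      exact ⟨entry_fst C S N n m, hinv, grows_refl d, hmem, hp⟩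
    | none =>
      by_cases hc : m ≥ (PySem.List.pyGet? C (n : Int)).getD 0
      · rw [pvLA_miss_ge C S N n m d hmem hc]
        obtain ⟨hv0, hinv0, hg0, hp0⟩ := ih m d hinv
        obtain ⟨hv1, hinv1, hg1, hp1⟩ :=
          ih (m - (PySem.List.pyGet? C (n : Int)).getD 0) (pvLA C S N n m d).2 hinv0
        have hv0' : (pvLA C S N n m d).1 = (pvGoB C S N n m).1 := hv0
        have hv1' : (pvLA C S N n (m - (PySem.List.pyGet? C (n : Int)).getD 0) (pvLA C S N n m d).2).1
            = (pvGoB C S N n (m - (PySem.List.pyGet? C (n : Int)).getD 0)).1 := hv1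
        have hbest : bestT C S N n m d = entryE C S N n m := by
          unfold bestT entryE cAt
          rw [hv0', hv1', if_pos hc]
          split_ifs with h1 h2 <;> first | rfl | (exfalso; omega)
        rw [hbest]
        have h2 : (entryE C S N n m).2 = 1 ∨ (entryE C S N n m).2 = 0 := by
          unfold entryE
          split_ifs <;> simp
        have hnext : HasPath C S N (pvLA C S N n (m - (PySem.List.pyGet? C (n : Int)).getD 0) (pvLA C S N n m d).2).2 n (nextM C S N n m) := by
          unfold nextM
          rcases h2 with h2 | h2
          · rw [h2, one_mul]
            exact hp1
          · rw [h2, zero_mul, sub_zero]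
            exact hasPath_mono C S N hg1 _ _ hp0
        exact ⟨entry_fst C S N n m,
          meminv_insert C S N hinv1 n m hnext,
          grows_trans (grows_trans hg0 hg1) (grows_insert_entry C S N hinv1 n m),
          PySem.Dict.get?_insert_self _ _ _,
          hasPath_mono C S N (grows_insert_entry C S N hinv1 n m) _ _ hnext⟩
      · rw [pvLA_miss_lt C S N n m d hmem hc]
        obtain ⟨hv0, hinv0, hg0, hp0⟩ := ih m d hinv
        have hv0' : (pvLA C S N n m d).1 = (pvGoB C S N n m).1 := hv0
        have he : ((pvLA C S N n m d).1 + (PySem.List.pyGet? N (n : Int)).getD 0, (0 : Int))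
            = entryE C S N n m := by
          unfold entryE cAt
          rw [if_neg hc, hv0']
        have h2 : (entryE C S N n m).2 = 0 := by
          unfold entryE cAt
          rw [if_neg hc]
        have hnext : HasPath C S N (pvLA C S N n m d).2 n (nextM C S N n m) := by
          unfold nextM
          rw [h2, zero_mul, sub_zero]
          exact hp0
        rw [he]
        exact ⟨(congrArg Prod.fst he).trans (entry_fst C S N n m),
          meminv_insert C S N hinv0 n m hnext,
          grows_trans hg0 (grows_insert_entry C S N hinv0 n m),
          PySem.Dict.get?_insert_self _ _ _,
          hasPath_mono C S N (grows_insert_entry C S N hinv0 n m) _ _ hnext⟩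

lemma recon_ok (C S N : List Int) (d : PySem.Dict (Int × Int) (Int × Int)) :
    ∀ (n : Nat) (m : Int) (acc : List Int), HasPath C S N d n m →
      pvReconA C d n m acc = acc ++ (bP C S N n m).reverse := by
  intro n
  induction n with
  | zero =>
    intro m acc _
    have h0 : bP C S N 0 m = [] := rfl
    simp [pvReconA, h0]
  | succ n ih =>
    intro m acc h
    obtain ⟨h1, h2⟩ := h
    unfold pvReconA
    rw [h1]
    simp only [Option.getD_some]
    have hstep : m - (entryE C S N n m).2 * ((PySem.List.pyGet? C (n : Int)).getD 0)
        = nextM C S N n m := rfl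
    rw [hstep, ih _ _ h2, path_succ]
    simp

-- ===== VERDICT (by name: the statement is the Claim_ definition above) =====
theorem partido_rec_mem_camino_spec : Claim_equal_partido_rec_mem_camino := by
  intro C S N M hdom hpre
  have hinv0 : MemInv C S N (PySem.Dict.mk []) := by
    intro n m t h
    have hnone : (PySem.Dict.mk ([] : List ((Int × Int) × (Int × Int)))).get? ((n : Int) + 1, m) = none := rfl
    rw [hnone] at h
    cases h
  obtain ⟨hv, hinv, hg, hp⟩ := LA_ok C S N S.length M (PySem.Dict.mk []) hinv0
  show ((pvLA C S N S.length M (PySem.Dict.mk [])).1,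
      (pvReconA C (pvLA C S N S.length M (PySem.Dict.mk [])).2 S.length M []).reverse)
    = pvGoB C S N S.length M
  rw [recon_ok C S N _ S.length M [] hp, hv]
  simp [bV, bP]
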